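-- pv_equiv track=rewrite | github.com/bracket/ratchet | ratchet/scales.py | parse_accents
-- ===== SOURCE A (Python) =====
-- def parse_accents(accents):
--     sharps, flats = 0, 0
--
--     for a in accents:
--         if a == '#':
--             if flats:
--                 flats -= 1
--             else:
--                 sharps += 1
--         elif a == 'b':
--             if sharps:
--                 sharps -= 1
--             else:
--                 flats += 1
--         elif a == 'n':
--             sharps, flats = 0, 0
--
--     return (sharps, flats)
-- ===== SOURCE B (Python) =====
-- def parse_accents(accents):
--     # A reset 'n' wipes all prior state, so only the suffix after the last 'n'
--     # matters.  Scan BACKWARDS, stopping at the first 'n' met (= the last reset),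
--     # summing signed deltas; split the net into (sharps, flats) at the end.
--     net = 0
--     for a in reversed(accents):
--         if a == 'n':
--             break
--         if a == '#':
--             net += 1
--         elif a == 'b':
--             net -= 1
--     return (net, 0) if net >= 0 else (0, -net)
-- ===== Notes on version B (the rewrite author's own statement) =====
-- stated objective: alternative
-- what changed: Instead of a forward state machine with two mutually-cancelling counters, B scans the string backwards, stopping at the first reset character it meets (after which A's state is fully determined), summing signed deltas and splitting the net into (sharps, flats) once at the end.
import Mathlib
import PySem

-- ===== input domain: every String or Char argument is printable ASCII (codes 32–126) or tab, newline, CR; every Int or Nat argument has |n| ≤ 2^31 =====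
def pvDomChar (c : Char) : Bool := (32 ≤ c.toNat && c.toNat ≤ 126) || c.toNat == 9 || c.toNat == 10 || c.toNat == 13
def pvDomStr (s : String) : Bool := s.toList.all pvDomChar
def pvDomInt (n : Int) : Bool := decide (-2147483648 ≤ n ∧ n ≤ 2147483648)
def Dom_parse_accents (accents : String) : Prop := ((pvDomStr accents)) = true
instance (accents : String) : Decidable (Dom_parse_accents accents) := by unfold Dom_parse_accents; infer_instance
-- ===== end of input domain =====

-- B scans the string backwards, stopping at the first 'n' met (the last reset), summing
-- signed deltas, and splits the net into (sharps, flats) once at the end; objective: alternative.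

-- ===== PORT A =====
-- one loop step of A: two counters with in-loop cancellation
def pvStepA (st : Int × Int) (a : Char) : Int × Int :=
  if a = '#' then
    (if st.2 ≠ 0 then (st.1, st.2 - 1) else (st.1 + 1, st.2))
  else if a = 'b' then
    (if st.1 ≠ 0 then (st.1 - 1, st.2) else (st.1, st.2 + 1))
  else if a = 'n' then (0, 0)
  else st

def parse_accents (accents : String) : Int × Int :=
  accents.toList.foldl pvStepA (0, 0)

-- ===== PORT B =====
-- B's reversed loop with 'break' at 'n': recursion over the reversed char list
def pvGoB (net : Int) : List Char → Int
  | [] => net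
  | a :: rest =>
    if a = 'n' then net
    else if a = '#' then pvGoB (net + 1) rest
    else if a = 'b' then pvGoB (net - 1) rest
    else pvGoB net rest

def parse_accents_alt (accents : String) : Int × Int :=
  let net := pvGoB 0 accents.toList.reverse
  if 0 ≤ net then (net, 0) else (0, -net)

-- ===== PRECONDITION & SPEC =====
def Spec_parse_accents (accents : String) (out : Int × Int) : Prop := out = parse_accents_alt accents
instance (accents : String) (out : Int × Int) : Decidable (Spec_parse_accents accents out) := by unfold Spec_parse_accents; infer_instance

-- ===== CLAIM (what is proved, stated in full; the proofs are below) =====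
def Claim_equal_parse_accents : Prop := ∀ (accents : String), Dom_parse_accents accents → Spec_parse_accents accents (parse_accents accents)

-- ===== LEMMAS AND PROOFS =====
-- the accumulator of B's backward scan factors out
lemma pvGoB_add (l : List Char) (n : Int) : pvGoB n l = n + pvGoB 0 l := by
  induction l generalizing n with
  | nil => simp [pvGoB]
  | cons a rest ih =>
    simp only [pvGoB]
    split_ifs <;> (try simp only [zero_add, zero_sub]) <;>
      (try rw [ih]) <;> (try rw [ih 1]) <;> (try rw [ih (-1)]) <;> omega

def pvEnc (n : Int) : Int × Int := if 0 ≤ n then (n, 0) else (0, -n)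

-- A's state after l is the encoding of B's backward net of l
lemma pv_state_eq (l : List Char) :
    l.foldl pvStepA (0, 0) = pvEnc (pvGoB 0 l.reverse) := by
  induction l using List.reverseRecOn with
  | nil => simp [pvGoB, pvEnc]
  | append_singleton l a ih =>
    rw [List.foldl_append, List.foldl_cons, List.foldl_nil, ih,
        List.reverse_append, List.reverse_singleton, List.singleton_append]
    simp only [pvGoB]
    unfold pvStepA pvEnc
    split_ifs <;>
      (try simp only [zero_add, zero_sub, pvGoB_add _ 1, pvGoB_add _ (-1)] at *) <;>
      (try refine Prod.ext ?_ ?_) <;> simp_all <;> omega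

-- ===== VERDICT (by name: the statement is the Claim_ definition above) =====
theorem parse_accents_spec : Claim_equal_parse_accents := by
  intro accents _
  show parse_accents accents = parse_accents_alt accents
  unfold parse_accents parse_accents_alt
  rw [pv_state_eq]
  rfl
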